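-- pv_equiv track=rewrite | github.com/muttley79/fakeiptv | tests/test_televizo.py | _manifest_segs
-- ===== SOURCE A (Python) =====
-- from typing import Dict, List, Optional, Tuple
--
-- def _manifest_segs(text: str) -> List[str]:
--     segs, expect = [], False
--     for line in text.splitlines():
--         line = line.strip()
--         if line.startswith("#EXTINF:"):
--             expect = True
--         elif expect and line and not line.startswith("#"):
--             segs.append(line)
--             expect = False
--     return segs
-- ===== SOURCE B (Python) =====
-- def _manifest_segs(text):
--     lines = [ln.strip() for ln in text.splitlines()]
--     segs = []
--     i, n = 0, len(lines)
--     while i < n: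
--         if lines[i].startswith("#EXTINF:"):
--             j = i + 1
--             while j < n and (not lines[j] or lines[j].startswith("#")):
--                 j += 1
--             if j < n:
--                 segs.append(lines[j])
--             i = j + 1
--         else:
--             i += 1
--     return segs
-- ===== Notes on version B (the rewrite author's own statement) =====
-- stated objective: alternative
-- what changed: Replaces the expect-flag state machine with an index-based two-pointer scan: on each #EXTINF: marker an inner loop skips blank/comment lines forward to the next content line, eliminating the boolean flag.
import Mathlib
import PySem

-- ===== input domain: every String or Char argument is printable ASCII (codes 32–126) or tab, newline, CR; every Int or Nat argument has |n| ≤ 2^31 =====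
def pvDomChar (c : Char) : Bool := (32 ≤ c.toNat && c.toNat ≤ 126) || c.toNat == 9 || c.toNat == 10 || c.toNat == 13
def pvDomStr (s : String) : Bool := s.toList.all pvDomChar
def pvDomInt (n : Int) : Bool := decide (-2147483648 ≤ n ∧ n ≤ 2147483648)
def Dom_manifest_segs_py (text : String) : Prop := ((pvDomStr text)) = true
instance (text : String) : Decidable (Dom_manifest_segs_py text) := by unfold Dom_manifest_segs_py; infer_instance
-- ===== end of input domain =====

-- B replaces A's expect-flag state machine by a two-pointer forward scan (alternative decomposition, same cost).

-- ===== PORT A =====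
-- A's loop body: state = (segs, expect)
def manifestStepA (st : List String × Bool) (line : String) : List String × Bool :=
  let line := PySem.Str.strip line
  if PySem.Str.startswith line "#EXTINF:" then (st.1, true)
  else if st.2 && !(PySem.Str.len line == 0) && !(PySem.Str.startswith line "#") then
    (st.1 ++ [line], false)
  else st

def manifest_segs_py (text : String) : List String :=
  ((PySem.Str.splitlines text).foldl manifestStepA ([], false)).1

-- ===== PORT B =====
-- B's two while loops over the (pre-stripped) lines, as recursion on the list suffix:
-- manifestLoop = the outer loop at index i, manifestSeek = the inner loop advancing j
-- (skip blank/comment lines, emit the first content line, resume the outer loop after it).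
mutual
def manifestLoop : List String → List String
  | [] => []
  | l :: rest =>
    if PySem.Str.startswith l "#EXTINF:" then manifestSeek rest
    else manifestLoop rest
def manifestSeek : List String → List String
  | [] => []
  | l :: rest =>
    if (PySem.Str.len l == 0) || PySem.Str.startswith l "#" then manifestSeek rest
    else l :: manifestLoop rest
end

def manifest_segs_py_alt (text : String) : List String :=
  manifestLoop ((PySem.Str.splitlines text).map PySem.Str.strip)

-- ===== PRECONDITION & SPEC =====
def Spec_manifest_segs_py (text : String) (out : List String) : Prop := out = manifest_segs_py_alt text
instance (text : String) (out : List String) : Decidable (Spec_manifest_segs_py text out) := by unfold Spec_manifest_segs_py; infer_instance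

-- ===== CLAIM (what is proved, stated in full; the proofs are below) =====
def Claim_equal_manifest_segs_py : Prop := ∀ (text : String), Dom_manifest_segs_py text → Spec_manifest_segs_py text (manifest_segs_py text)

-- ===== LEMMAS AND PROOFS =====

-- manifestStepA without its let-binding (definitional)
theorem stepA_eq (st : List String × Bool) (line : String) :
    manifestStepA st line =
      (if PySem.Str.startswith (PySem.Str.strip line) "#EXTINF:" then (st.1, true)
       else if st.2 && !(PySem.Str.len (PySem.Str.strip line) == 0)
               && !(PySem.Str.startswith (PySem.Str.strip line) "#") then
         (st.1 ++ [PySem.Str.strip line], false)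
       else st) := rfl

theorem startswith_hash {m : String} (h : PySem.Str.startswith m "#EXTINF:" = true) :
    PySem.Str.startswith m "#" = true := by
  simp only [PySem.Str.startswith_eq, PySem.Chars.startswith_iff] at h ⊢
  exact List.IsPrefix.trans (by decide) h

theorem foldA_eq (ls : List String) :
    ∀ (acc : List String) (b : Bool),
      (ls.foldl manifestStepA (acc, b)).1 =
        acc ++ (if b then manifestSeek (ls.map PySem.Str.strip)
                else manifestLoop (ls.map PySem.Str.strip)) := by
  induction ls with
  | nil => intro acc b; cases b <;> simp [manifestSeek, manifestLoop]
  | cons l rest ih =>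
    intro acc b
    simp only [List.foldl_cons, List.map_cons]
    set m := PySem.Str.strip l with hm
    clear_value m
    cases hE : PySem.Str.startswith m "#EXTINF:" with
    | true =>
      have hH : PySem.Str.startswith m "#" = true := startswith_hash hE
      have h1 : manifestStepA (acc, b) l = (acc, true) := by
        rw [stepA_eq, ← hm, hE]; simp
      have hseek : manifestSeek (m :: rest.map PySem.Str.strip)
          = manifestSeek (rest.map PySem.Str.strip) := by
        simp only [manifestSeek]; rw [hH]; simp
      have hloop : manifestLoop (m :: rest.map PySem.Str.strip)
          = manifestSeek (rest.map PySem.Str.strip) := by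
        simp only [manifestLoop]; rw [hE]; simp
      rw [h1, ih]
      cases b <;> simp [hseek, hloop]
    | false =>
      cases hL : (PySem.Str.len m == 0) with
      | true =>
        have h1 : manifestStepA (acc, b) l = (acc, b) := by
          rw [stepA_eq, ← hm, hE, hL]; cases b <;> simp
        have hseek : manifestSeek (m :: rest.map PySem.Str.strip)
            = manifestSeek (rest.map PySem.Str.strip) := by
          simp only [manifestSeek]; rw [hL]; simp
        have hloop : manifestLoop (m :: rest.map PySem.Str.strip)
            = manifestLoop (rest.map PySem.Str.strip) := by
          simp only [manifestLoop]; rw [hE]; simp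
        rw [h1, ih]
        cases b <;> simp [hseek, hloop]
      | false =>
        cases hS : PySem.Str.startswith m "#" with
        | true =>
          have h1 : manifestStepA (acc, b) l = (acc, b) := by
            rw [stepA_eq, ← hm, hE, hL, hS]; cases b <;> simp
          have hseek : manifestSeek (m :: rest.map PySem.Str.strip)
              = manifestSeek (rest.map PySem.Str.strip) := by
            simp only [manifestSeek]; rw [hS]; simp
          have hloop : manifestLoop (m :: rest.map PySem.Str.strip)
              = manifestLoop (rest.map PySem.Str.strip) := by
            simp only [manifestLoop]; rw [hE]; simp
          rw [h1, ih]
          cases b <;> simp [hseek, hloop]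
        | false =>
          have hloop : manifestLoop (m :: rest.map PySem.Str.strip)
              = manifestLoop (rest.map PySem.Str.strip) := by
            simp only [manifestLoop]; rw [hE]; simp
          cases b with
          | false =>
            have h1 : manifestStepA (acc, false) l = (acc, false) := by
              rw [stepA_eq, ← hm, hE]; simp
            rw [h1, ih]
            simp [hloop]
          | true =>
            have h1 : manifestStepA (acc, true) l = (acc ++ [m], false) := by
              rw [stepA_eq, ← hm, hE, hL, hS]; simp
            have hseek : manifestSeek (m :: rest.map PySem.Str.strip)
                = m :: manifestLoop (rest.map PySem.Str.strip) := by
              simp only [manifestSeek]; rw [hL, hS]; simp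
            rw [h1, ih]
            simp [hseek]

-- ===== VERDICT (by name: the statement is the Claim_ definition above) =====
theorem manifest_segs_py_spec : Claim_equal_manifest_segs_py := by
  intro text _
  unfold Spec_manifest_segs_py manifest_segs_py manifest_segs_py_alt
  simpa using foldA_eq (PySem.Str.splitlines text) [] false
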